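-- pv_equiv track=rewrite | github.com/AdamZhouSE/pythonHomework | Code/CodeRecords/2599/60591/252991.py | find
-- ===== SOURCE A (Python) =====
-- def isValid(nums,total,C):
--     result = []
--     for x in range(total):
--         result.append(0)
--     for num in nums:
--         for x in range(num[0] - 1,num[1]):
--             result[x] += 1
--     for x in range(len(result)):
--         if(result[x] > C[x]):
--             return False
--     return True
--
-- def generate(length,now,result,path):
--     if(length == 0):
--         path.sort()
--         if(path not in result):
--             result.append(path)
--         return
--     if(length > len(now)):
--         return
--     for x in now:
--         temp = path.copy()
--         temp.append(x)
--         res = now.copy()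
--         res.remove(x)
--         generate(length - 1,res,result,temp)
--
-- def find(AB,total,C):
--     for x in range(len(AB)):
--         result = []
--         path = []
--         generate(len(AB) - x, AB, result, path)
--         for res in result:
--             if (isValid(res, total, C)):
--                 return len(AB) - x
--     return -1
-- ===== SOURCE B (Python) =====
-- # The insane permutation generator (sort+dedup) is replaced by one bitmask
-- # enumeration of subsets; a single reusable coverage array is updated in place
-- # (add / check / undo) per subset instead of being rebuilt, tracking the best size.
-- def covers(result, num):
--     for x in range(num[0] - 1, num[1]):
--         result[x] += 1
--
-- def uncovers(result, num):
--     for x in range(num[0] - 1, num[1]):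
--         result[x] -= 1
--
-- def checkIn(result, C):
--     for x in range(len(result)):
--         if result[x] > C[x]:
--             return False
--     return True
--
-- def find(AB, total, C):
--     n = len(AB)
--     result = [0] * total
--     best = -1
--     for mask in range(1, 1 << n):
--         chosen = [AB[i] for i in range(n) if (mask >> i) & 1]
--         if len(chosen) > best:
--             for num in chosen:
--                 covers(result, num)
--             ok = checkIn(result, C)
--             for num in chosen:
--                 uncovers(result, num)
--             if ok:
--                 best = len(chosen)
--     return best
-- ===== Notes on version B (the rewrite author's own statement) =====
-- stated objective: faster
-- what changed: The superexponential generator of all sorted length-k permutations with linear-scan deduplication is replaced by a single bitmask enumeration of the 2^n subsets tracking the best valid size, with one reusable coverage array updated in place (add/check/undo) instead of rebuilt per candidate.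
import Mathlib
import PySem

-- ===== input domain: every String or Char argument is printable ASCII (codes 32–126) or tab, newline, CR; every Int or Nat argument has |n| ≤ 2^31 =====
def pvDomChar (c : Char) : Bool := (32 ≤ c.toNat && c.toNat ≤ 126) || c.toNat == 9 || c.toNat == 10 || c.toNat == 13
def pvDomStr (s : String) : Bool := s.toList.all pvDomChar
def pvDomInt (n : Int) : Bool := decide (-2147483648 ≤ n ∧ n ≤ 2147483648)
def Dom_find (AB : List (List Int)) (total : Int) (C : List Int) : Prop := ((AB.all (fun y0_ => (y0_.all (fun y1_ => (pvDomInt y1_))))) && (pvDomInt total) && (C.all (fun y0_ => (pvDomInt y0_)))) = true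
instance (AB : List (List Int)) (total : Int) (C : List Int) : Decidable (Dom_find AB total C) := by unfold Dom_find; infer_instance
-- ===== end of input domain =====

-- B replaces A's superexponential sorted-permutation generator (with list-scan dedup)
-- by one bitmask sweep over the 2^n subsets tracking the best valid size, updating one
-- reusable coverage array in place (add / check / undo) per subset (objective: faster).

-- ===== PORT A =====

-- Python's lexicographic comparison of int lists (used by path.sort())
def lexLe : List Int → List Int → Bool
  | [], _ => true
  | _ :: _, [] => false
  | a :: as_, b :: bs => if a < b then true else if b < a then false else lexLe as_ bs

def insertSorted (x : List Int) : List (List Int) → List (List Int)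
  | [] => [x]
  | y :: ys => if lexLe x y then x :: y :: ys else y :: insertSorted x ys

-- path.sort(): insertion sort by Python's list order; the order is total and
-- antisymmetric, so the sorted result is exactly the one Python produces
def sortLex : List (List Int) → List (List Int)
  | [] => []
  | x :: xs => insertSorted x (sortLex xs)

-- result[x] += 1 : Python indexing with negative wraparound; exact for
-- -len ≤ x < len (Python raises IndexError otherwise — those inputs are outside Pre_find)
def incAt (r : List Int) (x : Int) : List Int :=
  if -(r.length : Int) ≤ x ∧ x < r.length then
    r.set (if x < 0 then x + (r.length : Int) else x).toNat
      (r.getD (if x < 0 then x + (r.length : Int) else x).toNat 0 + 1)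
  else r

-- inner loop of isValid: for x in range(num[0]-1, num[1]): result[x] += 1
-- (num[0]/num[1] read with default 0, exact under Pre_find: each num has length ≥ 2)
def bumpNum (r : List Int) (num : List Int) : List Int :=
  (PySem.List.pyRange ((PySem.List.pyGet? num 0).getD 0 - 1)
      ((PySem.List.pyGet? num 1).getD 0) 1).foldl incAt r

-- isValid(nums, total, C); C[x] is read with default 0, exact under Pre_find
def isValid (nums : List (List Int)) (total : Int) (C : List Int) : Bool :=
  let result := nums.foldl bumpNum (List.replicate total.toNat 0)
  (List.range result.length).all (fun x => !(result.getD x 0 > C.getD x 0))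

-- generate(length, now, result, path); `res.remove(x)` = erase of the first occurrence
def generateA (len : Nat) (now : List (List Int)) (result : List (List (List Int)))
    (path : List (List Int)) : List (List (List Int)) :=
  if _h : len = 0 then
    if sortLex path ∈ result then result else result ++ [sortLex path]
  else if now.length < len then result
  else now.foldl (fun acc x => generateA (len - 1) (now.erase x) acc (path ++ [x])) result
termination_by len
decreasing_by omega

-- the outer `for x in range(len(AB))` loop with early return
def findGo (AB : List (List Int)) (total : Int) (C : List Int) : List Nat → Int
  | [] => -1
  | x :: rest =>
    let result := generateA (AB.length - x) AB [] []
    if result.any (fun res => isValid res total C) then (AB.length : Int) - (x : Int)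
    else findGo AB total C rest

def find (AB : List (List Int)) (total : Int) (C : List Int) : Int :=
  findGo AB total C (List.range AB.length)

-- ===== PORT B =====

-- result[x] -= 1 : Python indexing with negative wraparound, as incAt
def decAt (r : List Int) (x : Int) : List Int :=
  if -(r.length : Int) ≤ x ∧ x < r.length then
    r.set (if x < 0 then x + (r.length : Int) else x).toNat
      (r.getD (if x < 0 then x + (r.length : Int) else x).toNat 0 - 1)
  else r

-- uncovers(result, num): for x in range(num[0] - 1, num[1]): result[x] -= 1
def unbumpNum (r : List Int) (num : List Int) : List Int :=
  (PySem.List.pyRange ((PySem.List.pyGet? num 0).getD 0 - 1)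
      ((PySem.List.pyGet? num 1).getD 0) 1).foldl decAt r

-- checkIn(result, C): the capacity scan of Source B over the shared array
def checkIn (result : List Int) (C : List Int) : Bool :=
  (List.range result.length).all (fun x => !(result.getD x 0 > C.getD x 0))

-- find(AB, total, C) of Source B: one coverage array `result`, threaded through the
-- mask loop as state; covers = bumpNum (the same Python loop body as in A)
def find_alt (AB : List (List Int)) (total : Int) (C : List Int) : Int :=
  let n := AB.length
  (((List.range (2 ^ n)).drop 1).foldl
    (fun (st : Int × List Int) mask =>
      let best := st.1
      let result := st.2
      let chosen := ((List.range n).filter (fun i => (mask >>> i) &&& 1 == 1)).map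
        (fun i => AB.getD i [])
      if best < (chosen.length : Int) then
        let r1 := chosen.foldl bumpNum result
        let ok := checkIn r1 C
        let r2 := chosen.foldl unbumpNum r1
        (if ok then (chosen.length : Int) else best, r2)
      else (best, result))
    (-1, List.replicate total.toNat 0)).1

-- ===== PRECONDITION & SPEC =====

-- Pre_find excludes exactly the inputs on which Python A raises (and nothing else):
-- a num with fewer than 2 entries (IndexError reading num[1]), a nonempty write range
-- reaching outside Python's wraparound window [-total, total), or total > len(C) while
-- some single interval's (wraparound-aware) count vector fits under C on [0, len C)
-- — then that singleton's isValid scan reaches C[len(C)] and raises IndexError; when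
-- instead every singleton exceeds C somewhere on the prefix, every subset does too, every
-- isValid call returns False early, and A returns -1 (such inputs are inside Pre_find).
def Pre_find (AB : List (List Int)) (total : Int) (C : List Int) : Prop :=
  (∀ num ∈ AB, 2 ≤ num.length ∧
     (num.getD 0 0 - 1 < num.getD 1 0 →
        -(max total 0) ≤ num.getD 0 0 - 1 ∧ num.getD 1 0 ≤ max total 0)) ∧
  ((C.length : Int) < total →
    ∀ num ∈ AB, ∃ x < C.length,
      C.getD x 0 <
        (if num.getD 0 0 - 1 ≤ (x : Int) ∧ (x : Int) < num.getD 1 0 then 1 else 0) +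
        (if num.getD 0 0 - 1 ≤ (x : Int) - total ∧ (x : Int) - total < num.getD 1 0 then 1 else 0))

instance (AB : List (List Int)) (total : Int) (C : List Int) : Decidable (Pre_find AB total C) := by
  unfold Pre_find; infer_instance

def pvWitness_find : List (List Int) × Int × List Int := ([[1, 2], [2, 3]], 3, [1, 1, 1])

def Spec_find (AB : List (List Int)) (total : Int) (C : List Int) (out : Int) : Prop := out = find_alt AB total C
instance (AB : List (List Int)) (total : Int) (C : List Int) (out : Int) : Decidable (Spec_find AB total C out) := by unfold Spec_find; infer_instance

-- ===== CLAIM (what is proved, stated in full; the proofs are below) =====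
def Claim_equal_find : Prop := ∀ (AB : List (List Int)) (total : Int) (C : List Int), Dom_find AB total C → Pre_find AB total C → Spec_find AB total C (find AB total C)

-- ===== LEMMAS AND PROOFS =====

-- ---- generic foldl facts ----

theorem foldl_mem_or {α γ : Type} {f : List γ → α → List γ} {Q : α → γ → Prop}
    (hf : ∀ acc x r, r ∈ f acc x → r ∈ acc ∨ Q x r) :
    ∀ (l : List α) (acc : List γ) (r : γ), r ∈ List.foldl f acc l → r ∈ acc ∨ ∃ x ∈ l, Q x r := by
  intro l
  induction l with
  | nil => intro acc r h; exact Or.inl h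
  | cons x xs ih =>
    intro acc r h
    rcases ih (f acc x) r h with h' | ⟨y, hy, hq⟩
    · rcases hf acc x r h' with h'' | hq
      · exact Or.inl h''
      · exact Or.inr ⟨x, List.mem_cons_self, hq⟩
    · exact Or.inr ⟨y, List.mem_cons_of_mem _ hy, hq⟩

theorem foldl_mono {α γ : Type} {f : List γ → α → List γ}
    (hf : ∀ acc x, ∀ a ∈ acc, a ∈ f acc x) :
    ∀ (l : List α) (acc : List γ), ∀ a ∈ acc, a ∈ List.foldl f acc l := by
  intro l
  induction l with
  | nil => intro acc a ha; exact ha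
  | cons x xs ih => intro acc a ha; exact ih (f acc x) a (hf acc x a ha)

theorem foldl_reach {α γ : Type} {f : List γ → α → List γ}
    (hf : ∀ acc x, ∀ a ∈ acc, a ∈ f acc x) {x : α} :
    ∀ (l : List α), x ∈ l → ∀ acc, ∃ acc₀, ∀ r ∈ f acc₀ x, r ∈ List.foldl f acc l := by
  intro l
  induction l with
  | nil => intro h; cases h
  | cons y ys ih =>
    intro hx acc
    rcases List.mem_cons.mp hx with rfl | hx'
    · exact ⟨acc, fun r hr => foldl_mono hf ys (f acc x) r hr⟩
    · exact ih hx' (f acc y)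

-- ---- addAt generalises incAt/decAt; such updates commute and cancel ----

-- the wrapped index, as a Nat (proof-side view of incAt/decAt)
def idxN (L : Nat) (x : Int) : Nat := (if x < 0 then x + (L : Int) else x).toNat

def addAt (d : Int) (r : List Int) (x : Int) : List Int :=
  if -(r.length : Int) ≤ x ∧ x < r.length then
    r.set (idxN r.length x) (r.getD (idxN r.length x) 0 + d)
  else r

theorem incAt_eq (r : List Int) (x : Int) : incAt r x = addAt 1 r x := rfl

theorem decAt_eq (r : List Int) (x : Int) : decAt r x = addAt (-1) r x := by
  unfold decAt addAt idxN
  rw [Int.sub_eq_add_neg]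

theorem addAt_pos (d : Int) (r : List Int) (x : Int) (h : -(r.length : Int) ≤ x ∧ x < r.length) :
    addAt d r x = r.set (idxN r.length x) (r.getD (idxN r.length x) 0 + d) := by
  unfold addAt
  rw [if_pos h]

theorem addAt_neg (d : Int) (r : List Int) (x : Int) (h : ¬(-(r.length : Int) ≤ x ∧ x < r.length)) :
    addAt d r x = r := by
  unfold addAt
  rw [if_neg h]

theorem idxN_lt (L : Nat) (x : Int) (h : -(L : Int) ≤ x ∧ x < L) : idxN L x < L := by
  unfold idxN
  split <;> omega

theorem getD_set_self (r : List Int) (p : Nat) (w : Int) (h : p < r.length) :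
    (r.set p w).getD p 0 = w := by
  simp [List.getD_eq_getElem?_getD, h]

theorem set_getD_self (r : List Int) (p : Nat) :
    r.set p (r.getD p 0) = r := by
  apply List.ext_getElem
  · simp
  · intro i h1 h2
    rw [List.getElem_set]
    split
    · rename_i hp
      subst hp
      simp [List.getD_eq_getElem?_getD, List.getElem?_eq_getElem h2]
    · rfl

theorem addAt_comm (d e : Int) (r : List Int) (x y : Int) :
    addAt e (addAt d r x) y = addAt d (addAt e r y) x := by
  by_cases cx : -(r.length : Int) ≤ x ∧ x < r.length
  · by_cases cy : -(r.length : Int) ≤ y ∧ y < r.length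
    · rw [addAt_pos d r x cx, addAt_pos e r y cy]
      have cx' : -((r.set (idxN r.length y) (r.getD (idxN r.length y) 0 + e)).length : Int) ≤ x ∧
          x < (r.set (idxN r.length y) (r.getD (idxN r.length y) 0 + e)).length := by
        simpa [List.length_set] using cx
      have cy' : -((r.set (idxN r.length x) (r.getD (idxN r.length x) 0 + d)).length : Int) ≤ y ∧
          y < (r.set (idxN r.length x) (r.getD (idxN r.length x) 0 + d)).length := by
        simpa [List.length_set] using cy
      rw [addAt_pos _ _ y cy', addAt_pos _ _ x cx']
      simp only [List.length_set]
      have hax : idxN r.length x < r.length := idxN_lt _ _ cx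
      have hay : idxN r.length y < r.length := idxN_lt _ _ cy
      by_cases hxy : idxN r.length x = idxN r.length y
      · rw [← hxy, List.set_set, List.set_set,
            getD_set_self r _ _ hax, getD_set_self r _ _ (hxy ▸ hay)]
        congr 1
        omega
      · simp only [List.getD_eq_getElem?_getD]
        rw [List.getElem?_set_ne hxy, List.getElem?_set_ne (Ne.symm hxy),
            List.set_comm _ _ hxy]
    · have cy' : ¬(-((r.set (idxN r.length x) (r.getD (idxN r.length x) 0 + d)).length : Int) ≤ y ∧
          y < (r.set (idxN r.length x) (r.getD (idxN r.length x) 0 + d)).length) := by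
        simpa [List.length_set] using cy
      rw [addAt_pos d r x cx, addAt_neg _ _ y cy', addAt_neg _ r y cy, addAt_pos d r x cx]
  · by_cases cy : -(r.length : Int) ≤ y ∧ y < r.length
    · have cx' : ¬(-((r.set (idxN r.length y) (r.getD (idxN r.length y) 0 + e)).length : Int) ≤ x ∧
          x < (r.set (idxN r.length y) (r.getD (idxN r.length y) 0 + e)).length) := by
        simpa [List.length_set] using cx
      rw [addAt_neg d r x cx, addAt_pos e r y cy, addAt_neg _ _ x cx']
    · rw [addAt_neg d r x cx, addAt_neg e r y cy, addAt_neg d r x cx]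

theorem addAt_cancel (d : Int) (r : List Int) (x : Int) :
    addAt (-d) (addAt d r x) x = r := by
  by_cases cx : -(r.length : Int) ≤ x ∧ x < r.length
  · rw [addAt_pos d r x cx]
    have cx' : -((r.set (idxN r.length x) (r.getD (idxN r.length x) 0 + d)).length : Int) ≤ x ∧
        x < (r.set (idxN r.length x) (r.getD (idxN r.length x) 0 + d)).length := by
      simpa [List.length_set] using cx
    rw [addAt_pos _ _ x cx']
    simp only [List.length_set]
    have hax : idxN r.length x < r.length := idxN_lt _ _ cx
    rw [getD_set_self r _ _ hax, List.set_set]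
    have : r.getD (idxN r.length x) 0 + d + -d = r.getD (idxN r.length x) 0 := by omega
    rw [this, set_getD_self r _]
  · rw [addAt_neg d r x cx, addAt_neg (-d) r x cx]

theorem incAt_comm (r : List Int) (x y : Int) :
    incAt (incAt r x) y = incAt (incAt r y) x := by
  simp only [incAt_eq]
  exact addAt_comm 1 1 r x y

theorem inc_dec_comm (r : List Int) (x y : Int) :
    incAt (decAt r y) x = decAt (incAt r x) y := by
  simp only [incAt_eq, decAt_eq]
  exact (addAt_comm 1 (-1) r x y).symm

theorem inc_dec_cancel (r : List Int) (x : Int) : decAt (incAt r x) x = r := by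
  rw [incAt_eq, decAt_eq]
  exact addAt_cancel 1 r x

theorem foldl_comm_of_comm {α : Type} {g : List Int → α → List Int}
    (hc : ∀ r x y, g (g r x) y = g (g r y) x) :
    ∀ (xs : List α) (r : List Int) (x : α),
      List.foldl g (g r x) xs = g (List.foldl g r xs) x := by
  intro xs
  induction xs with
  | nil => intro r x; rfl
  | cons a l ih =>
    intro r x
    simp only [List.foldl_cons]
    rw [hc r x a]
    exact ih (g r a) x

theorem foldl_foldl_comm {α : Type} {g : List Int → α → List Int}
    (hc : ∀ r x y, g (g r x) y = g (g r y) x)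
    (xs ys : List α) (r : List Int) :
    List.foldl g (List.foldl g r xs) ys = List.foldl g (List.foldl g r ys) xs := by
  induction xs generalizing r with
  | nil => rfl
  | cons a l ih =>
    simp only [List.foldl_cons]
    rw [ih (g r a), foldl_comm_of_comm hc ys r a]

theorem foldl_perm {α β : Type} (f : β → α → β)
    (hc : ∀ b x y, f (f b x) y = f (f b y) x) :
    ∀ {l₁ l₂ : List α}, l₁.Perm l₂ → ∀ b, l₁.foldl f b = l₂.foldl f b := by
  intro l₁ l₂ h
  induction h with
  | nil => intro b; rfl
  | cons x _ ih => intro b; simp only [List.foldl_cons]; exact ih (f b x)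
  | swap x y l => intro b; simp only [List.foldl_cons]; rw [hc]
  | trans _ _ ih₁ ih₂ => intro b; rw [ih₁ b, ih₂ b]

theorem isValid_perm {nums nums' : List (List Int)} (h : nums.Perm nums')
    (total : Int) (C : List Int) : isValid nums total C = isValid nums' total C := by
  unfold isValid
  rw [foldl_perm bumpNum (fun r n₁ n₂ => foldl_foldl_comm incAt_comm _ _ r) h]

-- ---- cancellation of the in-place add/undo fold of B ----

theorem foldl_pull {α β : Type} {f : List Int → α → List Int} {g : List Int → β → List Int}
    {a : β} (hc : ∀ r x, f (g r a) x = g (f r x) a) :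
    ∀ (l : List α) (r : List Int), List.foldl f (g r a) l = g (List.foldl f r l) a := by
  intro l
  induction l with
  | nil => intro r; rfl
  | cons x l ih =>
    intro r
    simp only [List.foldl_cons]
    rw [hc r x, ih (f r x)]

theorem foldl_cancel {α : Type} {f g : List Int → α → List Int}
    (hc : ∀ r x y, f (g r y) x = g (f r x) y)
    (hcan : ∀ r a, g (f r a) a = r) :
    ∀ (l : List α) (r : List Int), List.foldl g (List.foldl f r l) l = r := by
  intro l
  induction l with
  | nil => intro r; rfl
  | cons a l ih =>
    intro r
    simp only [List.foldl_cons]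
    rw [← foldl_pull (fun r x => hc r x a) l (f r a), hcan r a]
    exact ih r

theorem foldl_comm2 {α β : Type} {f : List Int → α → List Int} {g : List Int → β → List Int}
    (hc : ∀ r x y, f (g r y) x = g (f r x) y) :
    ∀ (xs : List α) (ys : List β) (r : List Int),
      List.foldl f (List.foldl g r ys) xs = List.foldl g (List.foldl f r xs) ys := by
  intro xs
  induction xs with
  | nil => intro ys r; rfl
  | cons x xs ih =>
    intro ys r
    simp only [List.foldl_cons]
    rw [← foldl_pull (f := g) (fun r y => (hc r x y).symm) ys r, ih ys (f r x)]

theorem bump_unbump_cancel (r : List Int) (num : List Int) :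
    unbumpNum (bumpNum r num) num = r :=
  foldl_cancel inc_dec_comm inc_dec_cancel _ r

theorem bump_unbump_comm (r : List Int) (n1 n2 : List Int) :
    bumpNum (unbumpNum r n2) n1 = unbumpNum (bumpNum r n1) n2 :=
  foldl_comm2 inc_dec_comm _ _ r

theorem chosen_cancel (chosen : List (List Int)) (r : List Int) :
    chosen.foldl unbumpNum (chosen.foldl bumpNum r) = r :=
  foldl_cancel bump_unbump_comm bump_unbump_cancel chosen r

theorem checkIn_eq_isValid (nums : List (List Int)) (total : Int) (C : List Int) :
    checkIn (nums.foldl bumpNum (List.replicate total.toNat 0)) C = isValid nums total C := rfl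

-- ---- sortLex is a permutation ----

theorem insertSorted_perm (x : List Int) (l : List (List Int)) :
    (insertSorted x l).Perm (x :: l) := by
  induction l with
  | nil => exact List.Perm.refl _
  | cons y ys ih =>
    unfold insertSorted
    split
    · exact List.Perm.refl _
    · exact (List.Perm.cons y ih).trans (List.Perm.swap x y ys)

theorem sortLex_perm (l : List (List Int)) : (sortLex l).Perm l := by
  induction l with
  | nil => exact List.Perm.refl _
  | cons x xs ih => exact (insertSorted_perm x (sortLex xs)).trans (List.Perm.cons x ih)

-- ---- characterisation of generateA ----

theorem generateA_mono :
    ∀ (k : Nat) (now : List (List Int)) acc path, ∀ a ∈ acc, a ∈ generateA k now acc path := by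
  intro k
  induction k with
  | zero =>
    intro now acc path a ha
    rw [generateA, dif_pos rfl]
    split
    · exact ha
    · exact List.mem_append_left _ ha
  | succ k ih =>
    intro now acc path a ha
    rw [generateA, dif_neg (by omega : ¬(k + 1 = 0))]
    split
    · exact ha
    · simp only [Nat.add_sub_cancel]
      exact foldl_mono (fun acc' x b hb => ih (now.erase x) acc' (path ++ [x]) b hb) now acc a ha

theorem generateA_sound :
    ∀ (k : Nat) (now : List (List Int)) acc path res, res ∈ generateA k now acc path →
      res ∈ acc ∨ ∃ q, q.Subperm now ∧ q.length = k ∧ res.Perm (path ++ q) := by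
  intro k
  induction k with
  | zero =>
    intro now acc path res h
    rw [generateA, dif_pos rfl] at h
    split at h
    · exact Or.inl h
    · rcases List.mem_append.mp h with h' | h'
      · exact Or.inl h'
      · refine Or.inr ⟨[], List.nil_subperm, rfl, ?_⟩
        rw [List.append_nil]
        rw [List.mem_singleton.mp h']
        exact sortLex_perm path
  | succ k ih =>
    intro now acc path res h
    rw [generateA, dif_neg (by omega : ¬(k + 1 = 0))] at h
    split at h
    · exact Or.inl h
    · simp only [Nat.add_sub_cancel] at h
      have h' := foldl_mem_or
        (Q := fun x r => ∃ q', q'.Subperm (now.erase x) ∧ q'.length = k ∧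
          r.Perm ((path ++ [x]) ++ q'))
        (fun acc' x r hr => ih (now.erase x) acc' (path ++ [x]) r hr) now acc res h
      rcases h' with h' | ⟨x, hx, q', hsub, hlen', hperm⟩
      · exact Or.inl h'
      · refine Or.inr ⟨x :: q', ?_, by simp [hlen'], ?_⟩
        · exact ((List.subperm_cons x).mpr hsub).trans (List.perm_cons_erase hx).symm.subperm
        · simpa [List.append_assoc] using hperm

theorem generateA_complete :
    ∀ (k : Nat) (now : List (List Int)) acc path (q : List (List Int)),
      q.Subperm now → q.length = k →
      ∃ res ∈ generateA k now acc path, res.Perm (path ++ q) := by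
  intro k
  induction k with
  | zero =>
    intro now acc path q _ hlen
    rw [List.length_eq_zero_iff.mp hlen]
    refine ⟨sortLex path, ?_, by rw [List.append_nil]; exact sortLex_perm path⟩
    rw [generateA, dif_pos rfl]
    split
    · assumption
    · exact List.mem_append_right _ (List.mem_singleton_self _)
  | succ k ih =>
    intro now acc path q hsub hlen
    cases q with
    | nil => simp at hlen
    | cons x q' =>
      have hx : x ∈ now := hsub.subset List.mem_cons_self
      have hq' : q'.Subperm (now.erase x) :=
        (List.subperm_cons x).mp (hsub.trans (List.perm_cons_erase hx).subperm)
      have hguard : ¬(now.length < k + 1) := by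
        have hL := hsub.length_le
        have hlen2 : q'.length + 1 = k + 1 := by simpa using hlen
        simp only [List.length_cons] at hL
        omega
      rw [generateA, dif_neg (by omega : ¬(k + 1 = 0)), if_neg hguard]
      simp only [Nat.add_sub_cancel]
      obtain ⟨acc₀, hacc₀⟩ := foldl_reach
        (f := fun acc' y => generateA k (now.erase y) acc' (path ++ [y]))
        (fun acc' y a ha => generateA_mono k (now.erase y) acc' (path ++ [y]) a ha)
        now hx acc
      obtain ⟨res, hres, hperm⟩ := ih (now.erase x) acc₀ (path ++ [x]) q' hq'
        (by simpa using hlen)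
      exact ⟨res, hacc₀ res hres, by simpa [List.append_assoc] using hperm⟩

-- ---- reference scan over sizes ----

def Eb (AB : List (List Int)) (total : Int) (C : List Int) (j : Nat) : Bool :=
  AB.sublists.any (fun s => s.length == j && isValid s total C)

def scanP (p : Nat → Bool) : Nat → Int
  | 0 => -1
  | k + 1 => if p (k + 1) then ((k : Int) + 1) else scanP p k

theorem scanP_ge_neg_one (p : Nat → Bool) (k : Nat) : -1 ≤ scanP p k := by
  induction k with
  | zero => simp [scanP]
  | succ k ih => unfold scanP; split <;> omega

theorem scanP_ge (p : Nat → Bool) {j : Nat} (hp : p j = true) (hj : 1 ≤ j) :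
    ∀ k, j ≤ k → (j : Int) ≤ scanP p k := by
  intro k
  induction k with
  | zero => omega
  | succ k ih =>
    intro hjk
    unfold scanP
    split
    · omega
    · rename_i hk
      have : j ≠ k + 1 := by rintro rfl; rw [hp] at hk; simp at hk
      exact ih (by omega)

theorem scanP_cases (p : Nat → Bool) (k : Nat) :
    scanP p k = -1 ∨ ∃ j, 1 ≤ j ∧ j ≤ k ∧ p j = true ∧ scanP p k = (j : Int) := by
  induction k with
  | zero => left; rfl
  | succ k ih =>
    unfold scanP
    split
    · right; exact ⟨k + 1, by omega, by omega, by assumption, by push_cast; ring⟩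
    · rcases ih with h | ⟨j, h1, h2, h3, h4⟩
      · left; exact h
      · right; exact ⟨j, h1, by omega, h3, h4⟩

-- ---- A equals the scan ----

theorem generateA_exists_iff (AB : List (List Int)) (total : Int) (C : List Int) (k : Nat) :
    ((generateA k AB [] []).any (fun res => isValid res total C)) = Eb AB total C k := by
  rw [Bool.eq_iff_iff]
  simp only [List.any_eq_true, Eb, List.mem_sublists, Bool.and_eq_true, beq_iff_eq]
  constructor
  · rintro ⟨res, hres, hval⟩
    rcases generateA_sound k AB [] [] res hres with h | ⟨q, hsub, hlen, hperm⟩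
    · cases h
    · rcases hsub with ⟨s, hsp, hss⟩
      refine ⟨s, hss, by rw [hsp.length_eq, hlen], ?_⟩
      have hrq : res.Perm q := by simpa using hperm
      rw [isValid_perm hsp total C, ← isValid_perm hrq total C]
      exact hval
  · rintro ⟨s, hss, hslen, hval⟩
    obtain ⟨res, hres, hperm⟩ := generateA_complete k AB [] [] s hss.subperm hslen
    refine ⟨res, hres, ?_⟩
    have hrs : res.Perm s := by simpa using hperm
    rw [isValid_perm hrs total C]
    exact hval

theorem findGo_range' (AB : List (List Int)) (total : Int) (C : List Int) :
    ∀ k, k ≤ AB.length →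
      findGo AB total C (List.range' (AB.length - k) k) = scanP (Eb AB total C) k := by
  intro k
  induction k with
  | zero => intro _; rfl
  | succ k ih =>
    intro hk
    rw [List.range'_succ, findGo]
    have hx : AB.length - (AB.length - (k + 1)) = k + 1 := by omega
    have hx2 : AB.length - (k + 1) + 1 = AB.length - k := by omega
    rw [hx, hx2, generateA_exists_iff]
    unfold scanP
    split
    · omega
    · exact ih (by omega)

theorem find_eq_scan (AB : List (List Int)) (total : Int) (C : List Int) :
    find AB total C = scanP (Eb AB total C) AB.length := by
  unfold find
  have h := findGo_range' AB total C AB.length le_rfl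
  rwa [Nat.sub_self, ← List.range_eq_range'] at h

-- ---- B equals the scan ----

def chosenF (AB : List (List Int)) (m : Nat) : List (List Int) :=
  ((List.range AB.length).filter (fun i => (m >>> i) &&& 1 == 1)).map (fun i => AB.getD i [])

def gval (AB : List (List Int)) (total : Int) (C : List Int) (m : Nat) : Int :=
  if isValid (chosenF AB m) total C = true then ((chosenF AB m).length : Int) else -1

theorem shiftRight_two_mul (m : Nat) : ∀ i, (2 * m) >>> (i + 1) = m >>> i := by
  intro i
  induction i with
  | zero => simp [Nat.shiftRight_succ]
  | succ i ih => rw [Nat.shiftRight_succ, ih, ← Nat.shiftRight_succ]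

theorem shiftRight_two_mul_add_one (m : Nat) : ∀ i, (2 * m + 1) >>> (i + 1) = m >>> i := by
  intro i
  induction i with
  | zero => simp [Nat.shiftRight_succ]; omega
  | succ i ih => rw [Nat.shiftRight_succ, ih, ← Nat.shiftRight_succ]

theorem chosenF_nil (m : Nat) : chosenF [] m = [] := rfl

theorem chosenF_even (a : List Int) (AB : List (List Int)) (m : Nat) :
    chosenF (a :: AB) (2 * m) = chosenF AB m := by
  unfold chosenF
  rw [List.length_cons, List.range_succ_eq_map]
  rw [List.filter_cons_of_neg (by simp [Nat.and_one_is_mod])]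
  rw [List.filter_map]
  have hp : ((fun i => (2 * m) >>> i &&& 1 == 1) ∘ Nat.succ) = fun i => m >>> i &&& 1 == 1 := by
    funext i
    simp [Function.comp, shiftRight_two_mul]
  rw [hp, List.map_map]
  have hg : ((fun i => (a :: AB).getD i []) ∘ Nat.succ) = fun i => AB.getD i [] := by
    funext i
    simp
  rw [hg]

theorem chosenF_odd (a : List Int) (AB : List (List Int)) (m : Nat) :
    chosenF (a :: AB) (2 * m + 1) = a :: chosenF AB m := by
  unfold chosenF
  rw [List.length_cons, List.range_succ_eq_map]
  rw [List.filter_cons_of_pos (by simp [Nat.and_one_is_mod])]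
  rw [List.filter_map]
  have hp : ((fun i => (2 * m + 1) >>> i &&& 1 == 1) ∘ Nat.succ) = fun i => m >>> i &&& 1 == 1 := by
    funext i
    simp [Function.comp, shiftRight_two_mul_add_one]
  rw [hp, List.map_cons, List.map_map]
  have hg : ((fun i => (a :: AB).getD i []) ∘ Nat.succ) = fun i => AB.getD i [] := by
    funext i
    simp
  rw [hg]
  rfl

theorem chosenF_sublist (AB : List (List Int)) : ∀ m, (chosenF AB m).Sublist AB := by
  induction AB with
  | nil => intro m; rw [chosenF_nil]
  | cons a AB ih =>
    intro m
    rcases Nat.mod_two_eq_zero_or_one m with h | h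
    · rw [show m = 2 * (m / 2) from by omega, chosenF_even]
      exact (ih _).cons a
    · rw [show m = 2 * (m / 2) + 1 from by omega, chosenF_odd]
      exact (ih _).cons₂ a

theorem chosenF_eq_nil (AB : List (List Int)) :
    ∀ m, m < 2 ^ AB.length → chosenF AB m = [] → m = 0 := by
  induction AB with
  | nil => intro m hm _; simpa using hm
  | cons a AB ih =>
    intro m hm hemp
    rcases Nat.mod_two_eq_zero_or_one m with h | h
    · rw [show m = 2 * (m / 2) from by omega, chosenF_even] at hemp
      have hlt : m / 2 < 2 ^ AB.length := by
        rw [List.length_cons, pow_succ] at hm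
        omega
      have := ih (m / 2) hlt hemp
      omega
    · rw [show m = 2 * (m / 2) + 1 from by omega, chosenF_odd] at hemp
      simp at hemp

theorem chosenF_surj {s AB : List (List Int)} (h : s.Sublist AB) :
    ∃ m, m < 2 ^ AB.length ∧ chosenF AB m = s ∧ (s ≠ [] → m ≠ 0) := by
  induction h with
  | slnil => exact ⟨0, by simp, rfl, by simp⟩
  | cons a h ih =>
    obtain ⟨m, hm, hc, hne⟩ := ih
    refine ⟨2 * m, ?_, by rw [chosenF_even, hc], fun hs => by have := hne hs; omega⟩
    rw [List.length_cons, pow_succ]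
    omega
  | cons₂ a h ih =>
    obtain ⟨m, hm, hc, _⟩ := ih
    refine ⟨2 * m + 1, ?_, by rw [chosenF_odd, hc], by omega⟩
    rw [List.length_cons, pow_succ]
    omega

theorem foldr_max_pull (L : List Int) : ∀ b c : Int, L.foldr max (max b c) = max c (L.foldr max b) := by
  induction L with
  | nil => intro b c; simp [max_comm]
  | cons a L ih =>
    intro b c
    simp only [List.foldr_cons]
    rw [ih, max_left_comm]

theorem neg_one_le_foldr (L : List Int) : ∀ b : Int, b ≤ L.foldr max b := by
  induction L with
  | nil => intro b; exact le_rfl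
  | cons a L ih => intro b; exact le_trans (ih b) (le_max_right _ _)

theorem foldr_max_le (L : List Int) (c : Int) (h : ∀ a ∈ L, a ≤ c) :
    ∀ b : Int, b ≤ c → L.foldr max b ≤ c := by
  induction L with
  | nil => intro b hb; exact hb
  | cons a L ih =>
    intro b hb
    exact max_le (h a List.mem_cons_self) (ih (fun x hx => h x (List.mem_cons_of_mem _ hx)) b hb)

theorem le_foldr_max (L : List Int) {a : Int} (ha : a ∈ L) (b : Int) : a ≤ L.foldr max b := by
  induction L with
  | nil => cases ha
  | cons x L ih =>
    rcases List.mem_cons.mp ha with rfl | ha'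
    · exact le_max_left _ _
    · exact le_trans (ih ha') (le_max_right _ _)

theorem foldl_step_eq (AB : List (List Int)) (total : Int) (C : List Int) :
    ∀ (l : List Nat) (b : Int), -1 ≤ b →
      l.foldl (fun best mask =>
        if best < ((chosenF AB mask).length : Int) ∧ isValid (chosenF AB mask) total C = true
        then ((chosenF AB mask).length : Int) else best) b
      = (l.map (gval AB total C)).foldr max b := by
  intro l
  induction l with
  | nil => intro b _; rfl
  | cons m l ih =>
    intro b hb
    simp only [List.foldl_cons, List.map_cons, List.foldr_cons]
    have hstep : (if b < ((chosenF AB m).length : Int) ∧ isValid (chosenF AB m) total C = true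
        then ((chosenF AB m).length : Int) else b) = max b (gval AB total C m) := by
      unfold gval
      by_cases hv : isValid (chosenF AB m) total C = true
      · rw [if_pos hv]
        by_cases hl : b < ((chosenF AB m).length : Int)
        · rw [if_pos ⟨hl, hv⟩]; omega
        · rw [if_neg (by tauto)]; omega
      · rw [if_neg hv, if_neg (by tauto)]; omega
    rw [hstep, ih _ (le_trans hb (le_max_left _ _)), foldr_max_pull]

theorem mem_masks (n m : Nat) : m ∈ (List.range (2 ^ n)).drop 1 ↔ 1 ≤ m ∧ m < 2 ^ n := by
  have h1 : 2 ^ n = (2 ^ n - 1) + 1 := by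
    have := Nat.one_le_two_pow (n := n)
    omega
  rw [h1, List.range_succ_eq_map]
  simp only [List.drop_succ_cons, List.drop_zero, List.mem_map, List.mem_range]
  constructor
  · rintro ⟨x, hx, rfl⟩; omega
  · intro ⟨hm1, hm2⟩; exact ⟨m - 1, by omega, by omega⟩

theorem Eb_iff (AB : List (List Int)) (total : Int) (C : List Int) (j : Nat) :
    Eb AB total C j = true ↔ ∃ s, s.Sublist AB ∧ s.length = j ∧ isValid s total C = true := by
  simp [Eb, List.any_eq_true, List.mem_sublists]

-- B's stateful mask step (named so rewriting is stable) and the pure step it computes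
def stepB (AB : List (List Int)) (C : List Int) (st : Int × List Int) (mask : Nat) :
    Int × List Int :=
  let best := st.1
  let result := st.2
  let chosen := ((List.range AB.length).filter (fun i => (mask >>> i) &&& 1 == 1)).map
    (fun i => AB.getD i [])
  if best < (chosen.length : Int) then
    let r1 := chosen.foldl bumpNum result
    let ok := checkIn r1 C
    let r2 := chosen.foldl unbumpNum r1
    (if ok then (chosen.length : Int) else best, r2)
  else (best, result)

def stepP (AB : List (List Int)) (total : Int) (C : List Int) (b : Int) (mask : Nat) : Int :=
  if b < ((chosenF AB mask).length : Int) ∧ isValid (chosenF AB mask) total C = true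
  then ((chosenF AB mask).length : Int) else b

theorem find_alt_def (AB : List (List Int)) (total : Int) (C : List Int) :
    find_alt AB total C
      = (((List.range (2 ^ AB.length)).drop 1).foldl (stepB AB C)
          (-1, List.replicate total.toNat 0)).1 := rfl

-- one mask step on an all-zero coverage array: the undo fold cancels the add fold,
-- and the check on the freshly covered array is exactly isValid on the subset
theorem stepB_eq (AB : List (List Int)) (total : Int) (C : List Int) (b : Int) (m : Nat) :
    stepB AB C (b, List.replicate total.toNat 0) m
      = (stepP AB total C b m, List.replicate total.toNat 0) := by
  unfold stepB stepP chosenF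
  simp only [chosen_cancel, checkIn_eq_isValid]
  by_cases hb : b < ((((List.range AB.length).filter
      (fun i => (m >>> i) &&& 1 == 1)).map (fun i => AB.getD i [])).length : Int)
  · rw [if_pos hb]
    by_cases hv : isValid (((List.range AB.length).filter
        (fun i => (m >>> i) &&& 1 == 1)).map (fun i => AB.getD i [])) total C = true
    · rw [if_pos hv, if_pos ⟨hb, hv⟩]
    · rw [if_neg hv, if_neg (by tauto)]
  · rw [if_neg hb, if_neg (by tauto)]

theorem find_alt_state (AB : List (List Int)) (total : Int) (C : List Int) :
    ∀ (l : List Nat) (b0 : Int),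
      l.foldl (stepB AB C) (b0, List.replicate total.toNat 0)
        = (l.foldl (stepP AB total C) b0, List.replicate total.toNat 0) := by
  intro l
  induction l with
  | nil => intro b0; rfl
  | cons m l ih =>
    intro b0
    rw [List.foldl_cons, List.foldl_cons, stepB_eq]
    exact ih _

theorem find_alt_eq_scan (AB : List (List Int)) (total : Int) (C : List Int) :
    find_alt AB total C = scanP (Eb AB total C) AB.length := by
  have hfold : find_alt AB total C
      = (((List.range (2 ^ AB.length)).drop 1).map (gval AB total C)).foldr max (-1) := by
    rw [find_alt_def, find_alt_state AB total C]
    exact foldl_step_eq AB total C _ (-1) le_rfl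
  rw [hfold]
  apply le_antisymm
  · apply foldr_max_le
    · intro v hv
      rcases List.mem_map.mp hv with ⟨m, hm, rfl⟩
      rcases (mem_masks _ m).mp hm with ⟨h1, h2⟩
      unfold gval
      split
      · rename_i hval
        have hsub := chosenF_sublist AB m
        have hne : chosenF AB m ≠ [] := fun h => by
          have := chosenF_eq_nil AB m h2 h
          omega
        have hlen1 : 1 ≤ (chosenF AB m).length := by
          cases hql : chosenF AB m with
          | nil => exact absurd hql hne
          | cons _ _ => simp
        refine scanP_ge (Eb AB total C) ?_ hlen1 AB.length hsub.length_le
        exact (Eb_iff AB total C _).mpr ⟨chosenF AB m, hsub, rfl, hval⟩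
      · exact scanP_ge_neg_one _ _
    · exact scanP_ge_neg_one _ _
  · rcases scanP_cases (Eb AB total C) AB.length with h | ⟨j, hj1, hj2, hj3, hj4⟩
    · rw [h]; exact neg_one_le_foldr _ _
    · rw [hj4]
      obtain ⟨s, hss, hslen, hval⟩ := (Eb_iff AB total C j).mp hj3
      obtain ⟨m, hm2, hcm, hmne⟩ := chosenF_surj hss
      have hsne : s ≠ [] := by
        intro h
        rw [h] at hslen
        simp at hslen
        omega
      have hm1 : 1 ≤ m := Nat.one_le_iff_ne_zero.mpr (hmne hsne)
      have hmem : gval AB total C m ∈ ((List.range (2 ^ AB.length)).drop 1).map (gval AB total C) :=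
        List.mem_map_of_mem ((mem_masks _ m).mpr ⟨hm1, hm2⟩)
      have hgv : gval AB total C m = (j : Int) := by
        unfold gval
        rw [hcm, if_pos hval, hslen]
      rw [← hgv]
      exact le_foldr_max _ hmem _

-- ===== VERDICT (by name: the statement is the Claim_ definition above) =====
theorem find_spec : Claim_equal_find := by
  intro AB total C _hDom _hPre
  unfold Spec_find
  rw [find_eq_scan, find_alt_eq_scan]
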